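-- pv_equiv track=rewrite | github.com/MrBrantCode/unitest_baseline | mut_generate/mist_train_cf/cf_7385/solution.py | find_max_prime_subarray
-- ===== SOURCE A (Python) =====
-- def find_max_prime_subarray(array, k):
--     def is_prime(num):
--         if num < 2:
--             return False
--         for i in range(2, int(num**0.5) + 1):
--             if num % i == 0:
--                 return False
--         return True
--
--     max_sum = 0
--     for i in range(len(array) - k + 1):
--         subarray = array[i:i+k]
--         subarray_sum = sum(subarray)
--         if all(is_prime(num) for num in subarray) and subarray_sum > max_sum:
--             max_sum = subarray_sum
--     return max_sum
-- ===== SOURCE B (Python) =====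
-- def find_max_prime_subarray(array, k):
--     def is_prime(x):
--         return x >= 2 and all(x % d != 0 for d in range(2, int(x ** 0.5) + 1))
--
--     if k < 0:
--         return 0
--     n = len(array)
--     # prime flags are computed once per element (inside the prefix pass),
--     # and every window is answered in O(1) from prefix sums / prefix prime counts
--     prefix = [0]
--     pcount = [0]
--     for x in array:
--         prefix.append(prefix[-1] + x)
--         pcount.append(pcount[-1] + is_prime(x))
--     best = 0
--     for i in range(n - k + 1):
--         s = prefix[i + k] - prefix[i]
--         if pcount[i + k] - pcount[i] == k and s > best:
--             best = s
--     return best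
-- ===== Notes on version B (the rewrite author's own statement) =====
-- stated objective: faster
-- what changed: B computes each element's primality once and builds prefix sums and prefix prime counts in a single pass, so every length-k window is tested and summed in O(1) instead of re-slicing, re-summing and re-testing primality of all k elements per window.
-- outside the precondition, e.g. on find_max_prime_subarray([2, 3], -1): A returns 2, B returns 0
import Mathlib
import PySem

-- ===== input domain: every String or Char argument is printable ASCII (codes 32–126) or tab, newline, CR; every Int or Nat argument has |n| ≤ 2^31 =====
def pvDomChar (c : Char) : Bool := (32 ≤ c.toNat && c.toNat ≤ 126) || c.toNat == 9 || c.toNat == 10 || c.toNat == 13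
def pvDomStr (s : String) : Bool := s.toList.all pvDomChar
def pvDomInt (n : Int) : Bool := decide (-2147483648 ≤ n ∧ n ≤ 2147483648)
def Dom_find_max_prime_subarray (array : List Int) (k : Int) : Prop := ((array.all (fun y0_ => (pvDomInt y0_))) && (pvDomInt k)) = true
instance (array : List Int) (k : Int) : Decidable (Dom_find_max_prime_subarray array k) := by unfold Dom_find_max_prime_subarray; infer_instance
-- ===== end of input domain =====

-- B replaces A's per-window re-slice / re-sum / re-primality-test by one prefix pass
-- (prime flag once per element, prefix sums and prefix prime counts) with O(1) window queries.

-- ===== PORT A =====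
-- int(num**0.5) is ported as Nat.sqrt: exact for 0 ≤ num ≤ 2^31 (double sqrt is
-- correctly rounded there), and the num < 2 guard rules out negative num first.
def pvIsPrimeA (num : Int) : Bool :=
  if num < 2 then false
  else (PySem.List.pyRange 2 (Int.ofNat (Nat.sqrt num.toNat) + 1)).all
        (fun i => !(PySem.Int.mod num i == 0))

def find_max_prime_subarray (array : List Int) (k : Int) : Int :=
  (PySem.List.pyRange 0 ((array.length : Int) - k + 1)).foldl
    (fun max_sum i =>
      let subarray := PySem.List.slice array (some i) (some (i + k))
      let subarray_sum := subarray.sum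
      if subarray.all pvIsPrimeA && decide (subarray_sum > max_sum) then subarray_sum
      else max_sum)
    0

-- ===== PORT B =====
def pvIsPrimeB (x : Int) : Bool :=
  decide (2 ≤ x) && (PySem.List.pyRange 2 (Int.ofNat (Nat.sqrt x.toNat) + 1)).all
        (fun d => !(PySem.Int.mod x d == 0))

-- prefix[-1] / pcount[-1] are ported as pyGetD _ (-1) 0: both lists are nonempty
-- throughout, so the default is never used; likewise prefix[i+k] etc. are in range
-- for every i the loop visits.
def find_max_prime_subarray_alt (array : List Int) (k : Int) : Int :=
  if k < 0 then 0
  else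
    let pp := array.foldl
      (fun (st : List Int × List Int) x =>
        (st.1 ++ [PySem.List.pyGetD st.1 (-1) 0 + x],
         st.2 ++ [PySem.List.pyGetD st.2 (-1) 0 + (if pvIsPrimeB x then 1 else 0)]))
      ([0], [0])
    (PySem.List.pyRange 0 ((array.length : Int) - k + 1)).foldl
      (fun best i =>
        let s := PySem.List.pyGetD pp.1 (i + k) 0 - PySem.List.pyGetD pp.1 i 0
        if (PySem.List.pyGetD pp.2 (i + k) 0 - PySem.List.pyGetD pp.2 i 0 == k)
            && decide (s > best) then s
        else best)
      0

-- ===== PRECONDITION & SPEC =====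
-- Pre_ excludes only k < 0 with -k < len(array) (outside the task's natural domain of
-- window lengths), where Python's negative-end slice wraparound gives A accidental
-- nonempty windows; B returns 0 there. (For k < 0 with -k ≥ len(array) every window is
-- empty and A = B = 0, proved below, so those inputs stay inside Pre_.)
def Pre_find_max_prime_subarray (array : List Int) (k : Int) : Prop :=
  0 ≤ k ∨ (array.length : Int) + k ≤ 0
instance (array : List Int) (k : Int) : Decidable (Pre_find_max_prime_subarray array k) := by
  unfold Pre_find_max_prime_subarray; infer_instance

def pvWitness_find_max_prime_subarray : List Int × Int := ([2, 3, 4, 5], 2)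

def Spec_find_max_prime_subarray (array : List Int) (k : Int) (out : Int) : Prop := out = find_max_prime_subarray_alt array k
instance (array : List Int) (k : Int) (out : Int) : Decidable (Spec_find_max_prime_subarray array k out) := by unfold Spec_find_max_prime_subarray; infer_instance

-- ===== CLAIM (what is proved, stated in full; the proofs are below) =====
def Claim_equal_find_max_prime_subarray : Prop := ∀ (array : List Int) (k : Int), Dom_find_max_prime_subarray array k → Pre_find_max_prime_subarray array k → Spec_find_max_prime_subarray array k (find_max_prime_subarray array k)

-- ===== LEMMAS AND PROOFS =====

theorem pvWitness_ok :
    Dom_find_max_prime_subarray pvWitness_find_max_prime_subarray.1 pvWitness_find_max_prime_subarray.2 ∧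
    Pre_find_max_prime_subarray pvWitness_find_max_prime_subarray.1 pvWitness_find_max_prime_subarray.2 := by
  constructor <;> decide

theorem isPrime_eq (x : Int) : pvIsPrimeA x = pvIsPrimeB x := by
  unfold pvIsPrimeA pvIsPrimeB
  by_cases h : x < 2
  · simp [h, show ¬(2 ≤ x) by omega]
  · simp [h, show (2:Int) ≤ x by omega]

/-- the mathematical shape of B's prefix lists -/
def pvScan (s : Int) : List Int → List Int
  | [] => []
  | x :: t => (s + x) :: pvScan (s + x) t

theorem pyGetD_concat_neg_one (p : List Int) (y : Int) :
    PySem.List.pyGetD (p ++ [y]) (-1) 0 = y := by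
  simp [PySem.List.pyGetD, PySem.List.pyGet?, PySem.List.pyIdx?]

theorem scan_spec (h : Int → Int) :
    ∀ (l : List Int) (acc : List Int) (s : Int), PySem.List.pyGetD acc (-1) 0 = s →
      l.foldl (fun p x => p ++ [PySem.List.pyGetD p (-1) 0 + h x]) acc
        = acc ++ pvScan s (l.map h) := by
  intro l
  induction l with
  | nil => intro acc s _; simp [pvScan]
  | cons x t ih =>
    intro acc s hs
    simp only [List.foldl_cons, List.map_cons, pvScan, hs]
    rw [ih (acc ++ [s + h x]) (s + h x) (pyGetD_concat_neg_one _ _)]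
    simp

theorem scanP (l : List Int) :
    l.foldl (fun p x => p ++ [PySem.List.pyGetD p (-1) 0 + x]) [0] = 0 :: pvScan 0 l := by
  have := scan_spec (fun x => x) l [0] 0 rfl
  simpa using this

theorem scanC (l : List Int) :
    l.foldl (fun c x => c ++ [PySem.List.pyGetD c (-1) 0 + (if pvIsPrimeB x then 1 else 0)]) [0]
      = 0 :: pvScan 0 (l.map (fun x => if pvIsPrimeB x then (1:Int) else 0)) := by
  have := scan_spec (fun x => if pvIsPrimeB x then (1:Int) else 0) l [0] 0 rfl
  simpa using this

theorem scan_getD : ∀ (l : List Int) (s : Int) (j : Nat), j < l.length →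
    (pvScan s l).getD j 0 = s + (l.take (j + 1)).sum := by
  intro l
  induction l with
  | nil => intro s j hj; simp at hj
  | cons x t ih =>
    intro s j hj
    cases j with
    | zero => simp [pvScan]
    | succ m =>
      simp only [pvScan, List.getD_cons_succ]
      rw [ih (s + x) m (by simpa using hj)]
      simp [List.take_succ_cons]
      ring

theorem prefix_getD (h : Int → Int) (l : List Int) (j : Nat) (hj : j ≤ l.length) :
    ((0 :: pvScan 0 (l.map h)) : List Int).getD j 0 = ((l.take j).map h).sum := by
  cases j with
  | zero => simp
  | succ m =>
    simp only [List.getD_cons_succ]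
    rw [scan_getD (l.map h) 0 m (by simpa using hj)]
    simp [List.map_take]

theorem getP (l : List Int) (j : Int) (h0 : 0 ≤ j) (hj : j ≤ l.length) :
    PySem.List.pyGetD (0 :: pvScan 0 l) j 0 = (l.take j.toNat).sum := by
  rw [PySem.List.pyGetD_of_nonneg _ _ h0]
  have hp := prefix_getD (fun x => x) l j.toNat (by omega)
  simpa using hp

theorem getC (l : List Int) (j : Int) (h0 : 0 ≤ j) (hj : j ≤ l.length) :
    PySem.List.pyGetD (0 :: pvScan 0 (l.map (fun x => if pvIsPrimeB x then (1:Int) else 0))) j 0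
      = ((l.take j.toNat).map (fun x => if pvIsPrimeB x then (1:Int) else 0)).sum := by
  rw [PySem.List.pyGetD_of_nonneg _ _ h0]
  exact prefix_getD _ l j.toNat (by omega)

theorem slice_eq (l : List Int) (i k : Int) (hi : 0 ≤ i) (hk : 0 ≤ k) :
    PySem.List.slice l (some i) (some (i + k)) = (l.drop i.toNat).take k.toNat := by
  obtain ⟨a, rfl⟩ := Int.eq_ofNat_of_zero_le hi
  obtain ⟨b, rfl⟩ := Int.eq_ofNat_of_zero_le hk
  have h2 : ((a : Int)) + b = ((a + b : Nat) : Int) := by push_cast; ring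
  rw [h2, PySem.List.slice_natCast]
  simp

theorem slice_sum (l : List Int) (i k : Int) (hi : 0 ≤ i) (hk : 0 ≤ k) :
    (PySem.List.slice l (some i) (some (i + k))).sum
      = (l.take (i + k).toNat).sum - (l.take i.toNat).sum := by
  rw [slice_eq l i k hi hk]
  have h2 : (i+k).toNat = i.toNat + k.toNat := by omega
  rw [h2, List.take_add, List.sum_append]
  ring

theorem slice_count (l : List Int) (i k : Int) (hi : 0 ≤ i) (hk : 0 ≤ k)
    (hn : i + k ≤ l.length) :
    ((PySem.List.slice l (some i) (some (i + k))).all pvIsPrimeB = true)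
      ↔ (((l.take (i + k).toNat).map (fun x => if pvIsPrimeB x then (1:Int) else 0)).sum
          - ((l.take i.toNat).map (fun x => if pvIsPrimeB x then (1:Int) else 0)).sum = k) := by
  rw [slice_eq l i k hi hk]
  have h2 : (i+k).toNat = i.toNat + k.toNat := by omega
  rw [h2, List.take_add, List.map_append, List.sum_append]
  set sub := (l.drop i.toNat).take k.toNat with hsub
  have hsum : (sub.map (fun x => if pvIsPrimeB x then (1:Int) else 0)).sum
      = (sub.countP pvIsPrimeB : Int) := PySem.List.sum_map_ite_one_zero pvIsPrimeB sub
  have hlen : sub.length = k.toNat := by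
    simp [hsub]; omega
  have hcle : sub.countP pvIsPrimeB ≤ sub.length := List.countP_le_length
  constructor
  · intro ha
    have : sub.countP pvIsPrimeB = sub.length := by
      rw [List.countP_eq_length]
      exact fun a hma => List.all_eq_true.mp ha a hma
    rw [hsum, this, hlen]; omega
  · intro he
    rw [hsum] at he
    have : sub.countP pvIsPrimeB = sub.length := by omega
    exact List.all_eq_true.mpr ((List.countP_eq_length).mp this)

-- ===== VERDICT (by name: the statement is the Claim_ definition above) =====
theorem slice_empty (l : List Int) (i k : Int) (hk : k < 0) (hn : (l.length : Int) + k ≤ 0)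
    (hi : 0 ≤ i) : PySem.List.slice l (some i) (some (i + k)) = [] := by
  unfold PySem.List.slice PySem.List.clampIdx
  simp only []
  split_ifs <;> (apply List.take_eq_nil_iff.mpr; omega)

theorem foldl_zero_inv {α : Type} (l : List α) (f : Int → α → Int) (h : ∀ i ∈ l, f 0 i = 0) :
    l.foldl f 0 = 0 := by
  induction l with
  | nil => rfl
  | cons x t ih =>
    simp only [List.foldl_cons, h x (by simp)]
    exact ih (fun i hi => h i (by simp [hi]))

theorem find_max_prime_subarray_spec : Claim_equal_find_max_prime_subarray := by
  intro array k hdom hpre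
  by_cases hk : (0:Int) ≤ k
  case neg =>
    have hn : (array.length : Int) + k ≤ 0 := by
      rcases hpre with h | h
      · omega
      · exact h
    unfold Spec_find_max_prime_subarray find_max_prime_subarray find_max_prime_subarray_alt
    rw [if_pos (by omega)]
    apply foldl_zero_inv
    intro i hi
    obtain ⟨hi0, _⟩ := PySem.List.mem_pyRange_one.mp hi
    simp only []
    rw [slice_empty array i k (by omega) hn hi0]
    simp
  unfold Spec_find_max_prime_subarray find_max_prime_subarray find_max_prime_subarray_alt
  rw [if_neg (by omega)]
  simp only []
  rw [PySem.List.foldl_prod_mk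
        (f := fun p x => p ++ [PySem.List.pyGetD p (-1) 0 + x])
        (g := fun c x => c ++ [PySem.List.pyGetD c (-1) 0 + (if pvIsPrimeB x then 1 else 0)])]
  rw [scanP, scanC]
  apply PySem.List.foldl_congr_mem
  intro acc i hi
  obtain ⟨hi0, hiu⟩ := PySem.List.mem_pyRange_one.mp hi
  have hik : i + k ≤ (array.length : Int) := by omega
  have hik0 : (0:Int) ≤ i + k := by omega
  simp only []
  rw [getP array (i + k) hik0 hik, getP array i hi0 (by omega),
      getC array (i + k) hik0 hik, getC array i hi0 (by omega)]
  rw [← slice_sum array i k hi0 hk]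
  have hcond : (((array.take (i + k).toNat).map (fun x => if pvIsPrimeB x then (1:Int) else 0)).sum
          - ((array.take i.toNat).map (fun x => if pvIsPrimeB x then (1:Int) else 0)).sum == k)
        = (PySem.List.slice array (some i) (some (i + k))).all pvIsPrimeA := by
    rw [funext isPrime_eq]
    rw [Bool.eq_iff_iff, beq_iff_eq]
    exact (slice_count array i k hi0 hk hik).symm
  rw [hcond]
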